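-- pv_equiv track=rewrite | github.com/datasherlock/chess-analytics | pgn_utils/core.py | _get_edge_points
-- ===== SOURCE A (Python) =====
-- def _get_edge_points(data):
--     """Returns start and end indices for each game in the PGN"""
--     starts, ends = [], []
--     for n, l in enumerate(data):
--         if l.startswith("[Event"):
--             if n != 0:
--                 ends.append(n - 1)
--             starts.append(n)
--         elif n == len(data) - 1:
--             ends.append(n)
--     return starts, ends
-- ===== SOURCE B (Python) =====
-- def _get_edge_points(data):
--     """Returns start and end indices for each game in the PGN"""
--     starts, ends = [], []
--     nxt = None
--     for n, l in reversed(list(enumerate(data))):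
--         if l.startswith("[Event"):
--             starts.append(n)
--         if (nxt.startswith("[Event") if nxt is not None else not l.startswith("[Event")):
--             ends.append(n)
--         nxt = l
--     starts.reverse()
--     ends.reverse()
--     return starts, ends
-- ===== Notes on version B (the rewrite author's own statement) =====
-- stated objective: alternative
-- what changed: Replaces A's forward scan with its n != 0 / last-index special cases by a backward single pass carrying a one-line lookahead: an index is an end exactly when the following line starts a new event (or it is the last, non-event line); results are built in reverse and reversed once at the end.
import Mathlib
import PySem

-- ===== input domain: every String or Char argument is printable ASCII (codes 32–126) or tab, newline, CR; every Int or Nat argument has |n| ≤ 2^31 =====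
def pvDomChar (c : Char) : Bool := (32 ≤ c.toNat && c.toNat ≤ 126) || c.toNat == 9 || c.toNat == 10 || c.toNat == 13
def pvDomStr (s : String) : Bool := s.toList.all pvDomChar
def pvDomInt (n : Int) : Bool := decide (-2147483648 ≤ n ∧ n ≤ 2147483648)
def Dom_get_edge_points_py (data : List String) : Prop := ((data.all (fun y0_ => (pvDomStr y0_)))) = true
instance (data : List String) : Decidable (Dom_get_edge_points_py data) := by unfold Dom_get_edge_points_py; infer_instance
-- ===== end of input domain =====

-- B replaces A's forward interleaved scan (with its n != 0 boundary special case) by a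
-- backward single pass with a one-line lookahead: ends are decided by the pairwise rule
-- "the following line is an event line" (or "last line, not an event"), results are built
-- in reverse and reversed once at the end (objective: alternative).

-- ===== PORT A =====
def get_edge_points_py (data : List String) : List Int × List Int :=
  (PySem.List.enumerate data 0).foldl
    (fun (acc : List Int × List Int) (p : Int × String) =>
      if PySem.Str.startswith p.2 "[Event" then
        (acc.1 ++ [p.1], if p.1 ≠ 0 then acc.2 ++ [p.1 - 1] else acc.2)
      else if p.1 = (data.length : Int) - 1 then
        (acc.1, acc.2 ++ [p.1])
      else acc)
    ([], [])

-- ===== PORT B =====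
-- backward loop: fold over reversed(list(enumerate(data))); state = (starts, ends, nxt)
def get_edge_points_py_alt (data : List String) : List Int × List Int :=
  let r := ((PySem.List.enumerate data 0).reverse).foldl
    (fun (acc : List Int × List Int × Option String) (p : Int × String) =>
      let starts := if PySem.Str.startswith p.2 "[Event" then acc.1 ++ [p.1] else acc.1
      let cond := match acc.2.2 with
        | none => !(PySem.Str.startswith p.2 "[Event")
        | some nxt => PySem.Str.startswith nxt "[Event"
      let ends := if cond then acc.2.1 ++ [p.1] else acc.2.1
      (starts, ends, some p.2))
    ([], [], none)
  (r.1.reverse, r.2.1.reverse)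

-- ===== PRECONDITION & SPEC =====
def Spec_get_edge_points_py (data : List String) (out : List Int × List Int) : Prop := out = get_edge_points_py_alt data
instance (data : List String) (out : List Int × List Int) : Decidable (Spec_get_edge_points_py data out) := by unfold Spec_get_edge_points_py; infer_instance

-- ===== CLAIM (what is proved, stated in full; the proofs are below) =====
def Claim_equal_get_edge_points_py : Prop := ∀ (data : List String), Dom_get_edge_points_py data → Spec_get_edge_points_py data (get_edge_points_py data)

-- ===== LEMMAS AND PROOFS =====

/-- Event-line indices of `xs`, counting from `s`. -/
def pvStarts (xs : List String) (s : Int) : List Int :=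
  ((PySem.List.enumerate xs s).filter
      (fun p => PySem.Str.startswith p.2 "[Event")).map (fun p => p.1)

/-- The final end index contributed by the last line, if it is not an event line. -/
def pvTail (xs : List String) (s : Int) : List Int :=
  match xs.getLast? with
  | none => []
  | some last =>
      if PySem.Str.startswith last "[Event" then [] else [s + xs.length - 1]

/-- A-side ends for a suffix starting at index `s`: shifted event indices plus the tail. -/
def pvEnds (xs : List String) (s : Int) : List Int :=
  (pvStarts xs s).filterMap (fun n => if n ≠ 0 then some (n - 1) else none) ++ pvTail xs s

/-- B-side ends for a suffix starting at index `s`: the pairwise characterization. -/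
def pvEnds2 : List String → Int → List Int
  | [], _ => []
  | [x], s => if PySem.Str.startswith x "[Event" then [] else [s]
  | _ :: y :: ys, s =>
      (if PySem.Str.startswith y "[Event" then [s] else []) ++ pvEnds2 (y :: ys) (s + 1)

lemma foldA_eq (L : Int) (xs : List String) : ∀ (s : Int) (st en : List Int),
    L = s + xs.length →
    (PySem.List.enumerate xs s).foldl
      (fun (acc : List Int × List Int) (p : Int × String) =>
        if PySem.Str.startswith p.2 "[Event" then
          (acc.1 ++ [p.1], if p.1 ≠ 0 then acc.2 ++ [p.1 - 1] else acc.2)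
        else if p.1 = L - 1 then
          (acc.1, acc.2 ++ [p.1])
        else acc)
      (st, en)
    = (st ++ pvStarts xs s, en ++ pvEnds xs s) := by
  induction xs with
  | nil =>
      intro s st en _
      simp [PySem.List.enumerate, pvStarts, pvEnds, pvTail]
  | cons x xs ih =>
      intro s st en hL
      rw [PySem.List.enumerate_cons, List.foldl_cons]
      have htail : ∀ y ys, pvTail (x :: y :: ys) s = pvTail (y :: ys) (s + 1) := by
        intro y ys
        cases h : (y :: ys).getLast? with
        | none => simp at h
        | some last =>
            simp only [pvTail, List.getLast?_cons_cons, h]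
            split
            · rfl
            · simp
              omega
      by_cases hx : PySem.Str.startswith x "[Event" = true
      · have hxp := hx
        simp only [PySem.Str.startswith, String.reduceToList] at hxp
        rw [if_pos hx]
        rw [ih (s + 1) (st ++ [s]) _
          (by simp only [List.length_cons] at hL ⊢; push_cast at hL ⊢; omega)]
        cases xs with
        | nil =>
            by_cases hs : s = 0 <;>
              simp [pvStarts, pvEnds, pvTail, PySem.List.enumerate, hs, hxp]
        | cons y ys =>
            have hst : pvStarts (x :: y :: ys) s = s :: pvStarts (y :: ys) (s + 1) := by
              simp [pvStarts, PySem.List.enumerate_cons, hxp]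
            simp only [Prod.mk.injEq, pvEnds, htail, hst]
            refine ⟨by simp, ?_⟩
            by_cases hs : s = 0 <;> simp [hs, List.append_assoc]
      · have hxp := hx
        simp only [PySem.Str.startswith, String.reduceToList] at hxp
        rw [if_neg hx]
        cases xs with
        | nil =>
            have hlast : s = L - 1 := by
              simp only [List.length_cons, List.length_nil] at hL; omega
            rw [if_pos hlast]
            simp only [PySem.List.enumerate_nil, List.foldl_nil]
            simp [pvStarts, pvEnds, pvTail, PySem.List.enumerate, hxp]
        | cons y ys =>
            have hne : ¬ (s = L - 1) := by
              simp only [List.length_cons] at hL; push_cast at hL; omega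
            rw [if_neg hne]
            rw [ih (s + 1) st en
              (by simp only [List.length_cons] at hL ⊢; push_cast at hL ⊢; omega)]
            have hst : pvStarts (x :: y :: ys) s = pvStarts (y :: ys) (s + 1) := by
              simp [pvStarts, PySem.List.enumerate_cons, hxp]
            simp only [pvEnds, htail, hst]

/-- The backward fold of B computes reversed starts, reversed pairwise ends, and the head line. -/
lemma foldB_eq : ∀ (xs : List String) (s : Int) (st en : List Int),
    ((PySem.List.enumerate xs s).reverse).foldl
      (fun (acc : List Int × List Int × Option String) (p : Int × String) =>
        let starts := if PySem.Str.startswith p.2 "[Event" then acc.1 ++ [p.1] else acc.1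
        let cond := match acc.2.2 with
          | none => !(PySem.Str.startswith p.2 "[Event")
          | some nxt => PySem.Str.startswith nxt "[Event"
        let ends := if cond then acc.2.1 ++ [p.1] else acc.2.1
        (starts, ends, some p.2))
      (st, en, none)
    = (st ++ (pvStarts xs s).reverse, en ++ (pvEnds2 xs s).reverse, xs.head?.or none) := by
  intro xs
  induction xs with
  | nil =>
      intro s st en
      simp [PySem.List.enumerate, pvStarts, pvEnds2]
  | cons x xs ih =>
      intro s st en
      rw [PySem.List.enumerate_cons]
      simp only [List.reverse_cons, List.foldl_append, List.foldl_cons, List.foldl_nil]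
      rw [ih (s + 1) st en]
      cases xs with
      | nil =>
          by_cases hx : PySem.Str.startswith x "[Event" = true
          · simp only [PySem.Str.startswith, String.reduceToList] at hx
            simp [pvStarts, pvEnds2, PySem.List.enumerate, hx]
          · simp only [PySem.Str.startswith, String.reduceToList] at hx
            simp [pvStarts, pvEnds2, PySem.List.enumerate, hx]
      | cons y ys =>
          have hE : pvEnds2 (x :: y :: ys) s
              = (if PySem.Str.startswith y "[Event" then [s] else []) ++ pvEnds2 (y :: ys) (s + 1) := rfl
          by_cases hx : PySem.Str.startswith x "[Event" = true <;>
            [simp only [PySem.Str.startswith, String.reduceToList] at hx;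
             simp only [PySem.Str.startswith, String.reduceToList] at hx] <;>
          · have hS : pvStarts (x :: y :: ys) s
                = (if PySem.Chars.startswith x.toList ['[', 'E', 'v', 'e', 'n', 't'] then [s] else [])
                  ++ pvStarts (y :: ys) (s + 1) := by
              simp [pvStarts, PySem.List.enumerate_cons, hx]
            by_cases hy : PySem.Str.startswith y "[Event" = true <;>
              [simp only [PySem.Str.startswith, String.reduceToList] at hy;
               simp only [PySem.Str.startswith, String.reduceToList] at hy] <;>
            · simp only [hS, hE, PySem.Str.startswith, String.reduceToList,
                List.reverse_append, List.head?_cons]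
              simp [hx, hy, List.append_assoc]

/-- Bridging: A's suffix ends equal a boundary term plus B's pairwise suffix ends. -/
lemma ends_bridge : ∀ (xs : List String) (s : Int), 0 ≤ s →
    pvEnds xs s
      = (match xs.head? with
          | none => []
          | some x => if PySem.Str.startswith x "[Event" ∧ s ≠ 0 then [s - 1] else [])
        ++ pvEnds2 xs s := by
  intro xs
  induction xs with
  | nil => intro s _; simp [pvEnds, pvStarts, pvTail, pvEnds2, PySem.List.enumerate]
  | cons x xs ih =>
      intro s hs
      cases xs with
      | nil =>
          by_cases hx : PySem.Str.startswith x "[Event" = true <;>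
            [simp only [PySem.Str.startswith, String.reduceToList] at hx;
             simp only [PySem.Str.startswith, String.reduceToList] at hx] <;>
          · by_cases h0 : s = 0 <;>
              simp [pvEnds, pvStarts, pvTail, pvEnds2, PySem.List.enumerate,
                PySem.Str.startswith, hx, h0]
      | cons y ys =>
          have htail : pvTail (x :: y :: ys) s = pvTail (y :: ys) (s + 1) := by
            cases h : (y :: ys).getLast? with
            | none => simp at h
            | some last =>
                simp only [pvTail, List.getLast?_cons_cons, h]
                split
                · rfl
                · simp; omega
          have hstep : pvEnds (x :: y :: ys) s
              = (if PySem.Str.startswith x "[Event" ∧ s ≠ 0 then [s - 1] else [])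
                ++ pvEnds (y :: ys) (s + 1) := by
            by_cases hx : PySem.Str.startswith x "[Event" = true
            · have hxp := hx
              simp only [PySem.Str.startswith, String.reduceToList] at hxp
              have hS : pvStarts (x :: y :: ys) s = s :: pvStarts (y :: ys) (s + 1) := by
                simp [pvStarts, PySem.List.enumerate_cons, hxp]
              by_cases h0 : s = 0
              · subst h0
                simp [pvEnds, hS, htail, hxp]
              · simp [pvEnds, hS, htail, hxp, h0]
            · have hxp := hx
              simp only [PySem.Str.startswith, String.reduceToList] at hxp
              have hS : pvStarts (x :: y :: ys) s = pvStarts (y :: ys) (s + 1) := by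
                simp [pvStarts, PySem.List.enumerate_cons, hxp]
              simp [pvEnds, hS, htail, hxp]
          rw [hstep, ih (s + 1) (by omega)]
          have h1 : (s : Int) + 1 ≠ 0 := by omega
          simp only [List.head?_cons]
          by_cases hy : PySem.Str.startswith y "[Event" = true <;>
            simp only [PySem.Str.startswith, String.reduceToList] at hy <;>
            simp [pvEnds2, PySem.Str.startswith, String.reduceToList, hy, h1]

lemma alt_eq (data : List String) :
    get_edge_points_py_alt data = (pvStarts data 0, pvEnds2 data 0) := by
  unfold get_edge_points_py_alt
  rw [foldB_eq data 0 [] []]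
  simp

-- ===== VERDICT (by name: the statement is the Claim_ definition above) =====
theorem get_edge_points_py_spec : Claim_equal_get_edge_points_py := by
  intro data _
  unfold Spec_get_edge_points_py get_edge_points_py
  rw [foldA_eq (data.length : Int) data 0 [] [] (by simp), alt_eq]
  have h := ends_bridge data 0 (by omega)
  cases data with
  | nil => simp [pvEnds, pvEnds2, pvStarts, pvTail, PySem.List.enumerate]
  | cons x xs =>
      simp only [List.head?_cons] at h
      simp [h]
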